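-- pv_equiv track=rewrite | github.com/gdevilbat/Data-Science | project/super.py | getInterest
-- ===== SOURCE A (Python) =====
-- def getInterest(interest, venue):
--     data_int = []
--
--     for x in interest:
--         for y in venue:
--             data_int.append(x)
--
--     data_ven = []
--
--     for x in interest:
--         for y in venue:
--             data_ven.append(y)
--
--
--     return [data_int, data_ven]
-- ===== SOURCE B (Python) =====
-- def getInterest(interest, venue):
--     n = len(venue)
--     total = len(interest) * n
--     data_int = []
--     data_ven = []
--     for k in range(total):
--         i, j = divmod(k, n)
--         data_int.append(interest[i])
--         data_ven.append(venue[j])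
--     return [data_int, data_ven]
-- ===== Notes on version B (the rewrite author's own statement) =====
-- stated objective: alternative
-- what changed: Replaces the two nested loops over (interest x venue) by one single loop over the flat product index k in range(len(interest)*len(venue)), recovering both columns at once via divmod(k, len(venue)); no nested iteration and one pass instead of two.
import Mathlib
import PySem

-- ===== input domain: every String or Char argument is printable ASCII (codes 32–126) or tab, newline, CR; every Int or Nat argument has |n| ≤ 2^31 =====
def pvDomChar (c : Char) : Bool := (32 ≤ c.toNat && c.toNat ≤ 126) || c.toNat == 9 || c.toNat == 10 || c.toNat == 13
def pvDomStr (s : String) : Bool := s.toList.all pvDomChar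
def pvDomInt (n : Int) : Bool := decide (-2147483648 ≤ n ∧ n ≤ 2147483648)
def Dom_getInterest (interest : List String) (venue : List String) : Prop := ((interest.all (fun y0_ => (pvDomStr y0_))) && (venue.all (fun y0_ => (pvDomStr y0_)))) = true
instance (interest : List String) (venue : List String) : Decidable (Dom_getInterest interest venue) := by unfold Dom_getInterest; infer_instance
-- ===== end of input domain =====

-- B replaces the two nested loops by one single loop over the flat product index with divmod (alternative decomposition, same cost).

-- ===== PORT A =====
def getInterest (interest : List String) (venue : List String) : List (List String) :=
  let data_int := interest.foldl (fun acc x => venue.foldl (fun a _y => a ++ [x]) acc) []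
  let data_ven := interest.foldl (fun acc _x => venue.foldl (fun a y => a ++ [y]) acc) []
  [data_int, data_ven]

-- ===== PORT B =====
-- range(total) → List.range total (exact: total = len·len ≥ 0); divmod(k, n) → Nat k / n, k % n
-- (exact: k, n are nonnegative and the loop only runs when n > 0); interest[i] / venue[j] → getD
-- (exact: i < len(interest) and j < len(venue) hold for every k < total, so no IndexError occurs).
def getInterest_alt (interest : List String) (venue : List String) : List (List String) :=
  let n := venue.length
  let total := interest.length * n
  let p := (List.range total).foldl
    (fun (acc : List String × List String) k =>
      let i := k / n
      let j := k % n
      (acc.1 ++ [interest.getD i ""], acc.2 ++ [venue.getD j ""]))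
    ([], [])
  [p.1, p.2]

-- ===== PRECONDITION & SPEC =====
def Spec_getInterest (interest : List String) (venue : List String) (out : List (List String)) : Prop := out = getInterest_alt interest venue
instance (interest : List String) (venue : List String) (out : List (List String)) : Decidable (Spec_getInterest interest venue out) := by unfold Spec_getInterest; infer_instance

-- ===== CLAIM (what is proved, stated in full; the proofs are below) =====
def Claim_equal_getInterest : Prop := ∀ (interest : List String) (venue : List String), Dom_getInterest interest venue → Spec_getInterest interest venue (getInterest interest venue)

-- ===== LEMMAS AND PROOFS =====

-- A-side: the inner fold appends a constant n times / appends venue.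
lemma inner_const (venue : List String) (x : String) (acc : List String) :
    venue.foldl (fun a _y => a ++ [x]) acc = acc ++ List.replicate venue.length x := by
  induction venue generalizing acc with
  | nil => simp
  | cons v vs ih => rw [List.foldl_cons, ih, List.append_assoc]; simp [List.replicate_succ]

lemma inner_id (venue : List String) (acc : List String) :
    venue.foldl (fun a y => a ++ [y]) acc = acc ++ venue := by
  induction venue generalizing acc with
  | nil => simp
  | cons v vs ih => simp [List.foldl, ih]

lemma outer_int (interest venue : List String) (acc : List String) :
    interest.foldl (fun acc x => venue.foldl (fun a _y => a ++ [x]) acc) acc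
      = acc ++ interest.flatMap (fun x => List.replicate venue.length x) := by
  induction interest generalizing acc with
  | nil => simp
  | cons i is ih => rw [List.foldl_cons, inner_const, ih, List.append_assoc, List.flatMap_cons]

lemma outer_ven (interest venue : List String) (acc : List String) :
    interest.foldl (fun acc _x => venue.foldl (fun a y => a ++ [y]) acc) acc
      = acc ++ (List.replicate interest.length venue).flatten := by
  induction interest generalizing acc with
  | nil => simp
  | cons i is ih =>
    rw [List.foldl_cons, inner_id, ih, List.append_assoc]; simp [List.replicate_succ]

-- B-side: the pair-accumulating fold is the pair of maps over the index range.
lemma foldl_pair (l : List Nat) (f g : Nat → String) (a b : List String) :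
    l.foldl (fun (acc : List String × List String) k => (acc.1 ++ [f k], acc.2 ++ [g k])) (a, b)
      = (a ++ l.map f, b ++ l.map g) := by
  induction l generalizing a b with
  | nil => simp
  | cons k ks ih => simp [List.foldl, ih]

lemma map_getD_range (l : List String) :
    (List.range l.length).map (fun k => l.getD k "") = l := by
  apply List.ext_getElem
  · simp
  · intro i h1 h2
    simp [List.getD_eq_getElem?_getD, List.getElem?_eq_getElem h2]

-- index / n over the flat range reproduces the flatMap of replicates
lemma range_div (interest : List String) (n : Nat) (hn : 0 < n) :
    (List.range (interest.length * n)).map (fun k => interest.getD (k / n) "")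
      = interest.flatMap (fun x => List.replicate n x) := by
  induction interest with
  | nil => simp
  | cons x xs ih =>
    have hlen : (x :: xs).length * n = n + xs.length * n := by
      simp [List.length_cons, Nat.succ_mul, Nat.add_comm]
    rw [hlen, List.range_add, List.map_append, List.map_map, List.flatMap_cons]
    congr 1
    · have hc : List.map (fun k => (x :: xs).getD (k / n) "") (List.range n)
          = List.map (fun _ => x) (List.range n) := by
        apply List.map_congr_left
        intro k hk
        have : k / n = 0 := Nat.div_eq_of_lt (List.mem_range.mp hk)
        simp [this]
      rw [hc]
      simp
    · rw [← ih]
      apply List.map_congr_left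
      intro k _
      have : (n + k) / n = k / n + 1 := by
        rw [Nat.add_comm, Nat.add_div_right _ hn]
      simp [Function.comp, this]

-- index % n over the flat range reproduces the flattened replicate of venue
lemma range_mod (m : Nat) (venue : List String) :
    (List.range (m * venue.length)).map (fun k => venue.getD (k % venue.length) "")
      = (List.replicate m venue).flatten := by
  induction m with
  | zero => simp
  | succ m ih =>
    have hlen : (m + 1) * venue.length = venue.length + m * venue.length := by
      simp [Nat.succ_mul, Nat.add_comm]
    rw [hlen, List.range_add, List.map_append, List.map_map, List.replicate_succ,
        List.flatten_cons]
    congr 1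
    · have : ∀ k ∈ List.range venue.length,
          venue.getD (k % venue.length) "" = venue.getD k "" := by
        intro k hk
        rw [Nat.mod_eq_of_lt (List.mem_range.mp hk)]
      rw [List.map_congr_left this, map_getD_range]
    · rw [← ih]
      apply List.map_congr_left
      intro k _
      simp [Function.comp, Nat.add_mod_left]

-- ===== VERDICT (by name: the statement is the Claim_ definition above) =====
theorem getInterest_spec : Claim_equal_getInterest := by
  intro interest venue _
  unfold Spec_getInterest getInterest getInterest_alt
  simp only [outer_int, outer_ven, List.nil_append, foldl_pair]
  rcases Nat.eq_zero_or_pos venue.length with h | h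
  · have hv : venue = [] := List.length_eq_zero_iff.mp h
    subst hv
    simp
  · rw [range_div _ _ h, range_mod]
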